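-- pv_equiv track=rewrite | github.com/mmshaikh88/anagram | anagram-valid.py | generate_anagram
-- ===== SOURCE A (Python) =====
-- import itertools
--
-- def generate_anagram(word):
--    """
--    Generate all possible combination of the given string/word
--    provided as parameter.
--    @type word: [str]
--    @rtype: [str]
--    """
--
--    return_list = []
--    for i in range(0, len(word)+1):
--       for subset in itertools.permutations(word, i):
--          possible = ''
--          for letter in subset:
--            possible += letter
--          if len(possible) == len(word):
--             return_list.append(possible)
--
--    return (return_list)
-- ===== SOURCE B (Python) =====
-- def generate_anagram(word):
--     def perms(chars):
--         if not chars: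
--             return [[]]
--         out = []
--         for i in range(len(chars)):
--             rest = chars[:i] + chars[i+1:]
--             for p in perms(rest):
--                 out.append([chars[i]] + p)
--         return out
--     return [''.join(p) for p in perms(list(word))]
-- ===== Notes on version B (the rewrite author's own statement) =====
-- stated objective: alternative
-- what changed: B generates only full-length permutations with a direct recursive index-removal generator, instead of A's sweep over itertools.permutations of every length 0..n that filters out all but the full-length ones.
import Mathlib
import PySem

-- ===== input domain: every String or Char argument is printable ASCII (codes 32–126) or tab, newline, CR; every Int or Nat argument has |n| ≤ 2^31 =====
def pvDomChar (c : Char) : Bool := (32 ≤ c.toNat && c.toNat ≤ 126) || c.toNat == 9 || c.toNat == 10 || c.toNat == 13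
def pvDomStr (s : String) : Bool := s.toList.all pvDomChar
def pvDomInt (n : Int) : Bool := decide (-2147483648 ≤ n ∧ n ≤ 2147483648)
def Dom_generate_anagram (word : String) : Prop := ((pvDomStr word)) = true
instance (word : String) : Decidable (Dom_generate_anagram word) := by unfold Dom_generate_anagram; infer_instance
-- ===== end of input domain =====

-- B replaces A's itertools sweep over every permutation length (keeping only full-length ones)
-- by a direct recursive generator of full-length permutations: alternative, genuinely different structure.

-- ===== PORT A =====
-- itertools.permutations(pool, r) in itertools' order: pick each index in turn, recurse on the rest.
def pvPermsLen (pool : List Char) : Nat → List (List Char)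
  | 0 => [[]]
  | r + 1 =>
    (List.range pool.length).flatMap fun i =>
      (pvPermsLen (pool.eraseIdx i) r).map (pool.getD i default :: ·)

def generate_anagram (word : String) : List String :=
  let cs := word.toList
  (List.range (cs.length + 1)).foldl
    (fun acc i =>
      (pvPermsLen cs i).foldl
        (fun acc subset =>
          let possible := subset.foldl (fun s letter => s ++ [letter]) []
          if possible.length = cs.length then acc ++ [String.mk possible] else acc)
        acc)
    []

-- ===== PORT B =====
-- B's recursive helper perms(chars): base [[]], else fix each index i, prepend chars[i] to perms(rest).
def pvPermsB : List Char → List (List Char)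
  | [] => [[]]
  | c :: t =>
    (List.range (c :: t).length).attach.flatMap fun i =>
      (pvPermsB ((c :: t).eraseIdx i.1)).map ((c :: t).getD i.1 default :: ·)
  termination_by l => l.length
  decreasing_by
    have hi : i.1 < (c :: t).length := List.mem_range.mp i.2
    rw [List.length_eraseIdx_of_lt hi]
    simp

def generate_anagram_alt (word : String) : List String :=
  (pvPermsB word.toList).map String.mk

-- ===== PRECONDITION & SPEC =====
def Spec_generate_anagram (word : String) (out : List String) : Prop := out = generate_anagram_alt word
instance (word : String) (out : List String) : Decidable (Spec_generate_anagram word out) := by unfold Spec_generate_anagram; infer_instance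

-- ===== CLAIM (what is proved, stated in full; the proofs are below) =====
def Claim_equal_generate_anagram : Prop := ∀ (word : String), Dom_generate_anagram word → Spec_generate_anagram word (generate_anagram word)

-- ===== LEMMAS AND PROOFS =====

theorem pvFlatMapAttach {α β : Type} (l : List α) (g : α → List β) :
    l.attach.flatMap (fun x => g x.1) = l.flatMap g := by
  simp [List.flatMap]

theorem pvPermsB_cons (c : Char) (t : List Char) :
    pvPermsB (c :: t) =
      (List.range (c :: t).length).flatMap fun i =>
        (pvPermsB ((c :: t).eraseIdx i)).map ((c :: t).getD i default :: ·) := by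
  rw [pvPermsB]
  exact pvFlatMapAttach (List.range (c :: t).length)
    (fun i => (pvPermsB ((c :: t).eraseIdx i)).map ((c :: t).getD i default :: ·))

theorem pvFoldAppend (l : List Char) (a : List Char) :
    l.foldl (fun s letter => s ++ [letter]) a = a ++ l := by
  induction l generalizing a with
  | nil => simp
  | cons c t ih => simp [List.foldl, ih]

theorem pvPermsLen_length {r : Nat} : ∀ {pool sub : List Char},
    sub ∈ pvPermsLen pool r → sub.length = r := by
  induction r with
  | zero => intro pool sub h; simp [pvPermsLen] at h; simp [h]
  | succ r ih =>
    intro pool sub h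
    simp [pvPermsLen] at h
    obtain ⟨i, _, p, hp, rfl⟩ := h
    simp [ih hp]

theorem pvPermsB_eq : ∀ (n : Nat) (cs : List Char), cs.length = n →
    pvPermsLen cs n = pvPermsB cs := by
  intro n
  induction n with
  | zero =>
    intro cs h
    have : cs = [] := List.length_eq_zero_iff.mp h
    subst this; simp [pvPermsLen, pvPermsB]
  | succ n ih =>
    intro cs h
    cases cs with
    | nil => simp at h
    | cons c t =>
      rw [pvPermsB_cons, pvPermsLen]
      apply List.flatMap_congr
      intro i hi
      congr 1
      apply ih
      have hi' : i < (c :: t).length := List.mem_range.mp hi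
      rw [List.length_eraseIdx_of_lt hi']
      omega

theorem pvInnerAppendAll (l : List (List Char)) (n : Nat)
    (hl : ∀ sub ∈ l, sub.length = n) (acc : List String) :
    l.foldl
      (fun acc subset =>
        let possible := subset.foldl (fun s letter => s ++ [letter]) []
        if possible.length = n then acc ++ [String.mk possible] else acc)
      acc = acc ++ l.map String.mk := by
  induction l generalizing acc with
  | nil => simp
  | cons s t ih =>
    simp only [List.foldl, List.map]
    rw [pvFoldAppend]
    simp only [List.nil_append]
    rw [if_pos (hl s (by simp))]
    rw [ih (fun sub h => hl sub (by simp [h]))]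
    simp

theorem pvInnerNoop (l : List (List Char)) (r n : Nat) (hrn : r ≠ n)
    (hl : ∀ sub ∈ l, sub.length = r) (acc : List String) :
    l.foldl
      (fun acc subset =>
        let possible := subset.foldl (fun s letter => s ++ [letter]) []
        if possible.length = n then acc ++ [String.mk possible] else acc)
      acc = acc := by
  induction l generalizing acc with
  | nil => simp
  | cons s t ih =>
    simp only [List.foldl]
    rw [pvFoldAppend]
    simp only [List.nil_append]
    rw [if_neg (by rw [hl s (by simp)]; exact hrn)]
    exact ih (fun sub h => hl sub (by simp [h])) acc

theorem pvOuterNoop (m n : Nat) (hmn : m ≤ n) (cs : List Char) (hcs : cs.length = n) (acc : List String) :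
    (List.range m).foldl
      (fun acc i =>
        (pvPermsLen cs i).foldl
          (fun acc subset =>
            let possible := subset.foldl (fun s letter => s ++ [letter]) []
            if possible.length = cs.length then acc ++ [String.mk possible] else acc)
          acc)
      acc = acc := by
  induction m generalizing acc with
  | zero => simp
  | succ m ih =>
    rw [List.range_succ, List.foldl_append]
    rw [ih (by omega)]
    simp only [List.foldl]
    rw [hcs]
    exact pvInnerNoop _ m n (by omega) (fun sub h => pvPermsLen_length h) acc

-- ===== VERDICT (by name: the statement is the Claim_ definition above) =====
theorem generate_anagram_spec : Claim_equal_generate_anagram := by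
  intro word _
  unfold Spec_generate_anagram generate_anagram generate_anagram_alt
  set cs := word.toList with hcs
  simp only
  rw [List.range_succ, List.foldl_append]
  rw [pvOuterNoop cs.length cs.length (le_refl _) cs rfl []]
  simp only [List.foldl]
  rw [pvInnerAppendAll _ cs.length (fun sub h => pvPermsLen_length h) []]
  rw [pvPermsB_eq cs.length cs rfl]
  simp
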